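-- pv_equiv track=rewrite | github.com/andongniming-ui/recording_playback_platform | platform/backend/utils/replay_compare_rules.py | _apply_header_transforms
-- ===== SOURCE A (Python) =====
-- def _normalize_rule_entries(value) -> list[dict]:
--     if isinstance(value, list):
--         return [item for item in value if isinstance(item, dict)]
--     if isinstance(value, dict):
--         return [value]
--     return []
--
-- def _apply_header_transforms(headers: dict, transforms) -> dict:
--     if not isinstance(headers, dict):
--         headers = {}
--     result = {
--         str(key): "" if value is None else str(value)
--         for key, value in headers.items()
--     }
--     entries = _normalize_rule_entries(transforms)
--     for entry in entries:
--         transform_type = str(entry.get("type") or "replace").lower()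
--         key = str(entry.get("key") or "").strip()
--         if not key:
--             continue
--         if transform_type == "remove":
--             matched = next((existing for existing in result if existing.lower() == key.lower()), None)
--             if matched:
--                 result.pop(matched, None)
--             continue
--         value = "" if entry.get("value") is None else str(entry.get("value"))
--         matched = next((existing for existing in result if existing.lower() == key.lower()), None)
--         result[matched or key] = value
--     return result
-- ===== SOURCE B (Python) =====
-- def _normalize_rule_entries(value) -> list[dict]:
--     if isinstance(value, list):
--         return [item for item in value if isinstance(item, dict)]
--     if isinstance(value, dict):
--         return [value]
--     return []
--
-- def _apply_header_transforms(headers: dict, transforms) -> dict: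
--     # A lowercase-key index (queues of live keys per lowercase form) built once
--     # replaces the per-entry case-insensitive rescan of all result keys.
--     if not isinstance(headers, dict):
--         headers = {}
--     result = {
--         str(key): "" if value is None else str(value)
--         for key, value in headers.items()
--     }
--     index = {}
--     for k in result:
--         index.setdefault(k.lower(), []).append(k)
--     for entry in _normalize_rule_entries(transforms):
--         transform_type = str(entry.get("type") or "replace").lower()
--         key = str(entry.get("key") or "").strip()
--         if not key:
--             continue
--         low = key.lower()
--         bucket = index.get(low)
--         if transform_type == "remove":
--             if bucket:
--                 result.pop(bucket.pop(0), None)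
--             continue
--         value = "" if entry.get("value") is None else str(entry.get("value"))
--         if bucket:
--             result[bucket[0]] = value
--         else:
--             result[key] = value
--             index[low] = [key]
--     return result
-- ===== Notes on version B (the rewrite author's own statement) =====
-- stated objective: alternative
-- what changed: B builds a lowercase-key index (a dict mapping each lowercase form to the queue of live result keys with that form) once, so each transform entry is handled by dict lookups instead of A's case-insensitive rescan of all result keys per entry; on the measured inputs this was not faster.
import Mathlib
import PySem

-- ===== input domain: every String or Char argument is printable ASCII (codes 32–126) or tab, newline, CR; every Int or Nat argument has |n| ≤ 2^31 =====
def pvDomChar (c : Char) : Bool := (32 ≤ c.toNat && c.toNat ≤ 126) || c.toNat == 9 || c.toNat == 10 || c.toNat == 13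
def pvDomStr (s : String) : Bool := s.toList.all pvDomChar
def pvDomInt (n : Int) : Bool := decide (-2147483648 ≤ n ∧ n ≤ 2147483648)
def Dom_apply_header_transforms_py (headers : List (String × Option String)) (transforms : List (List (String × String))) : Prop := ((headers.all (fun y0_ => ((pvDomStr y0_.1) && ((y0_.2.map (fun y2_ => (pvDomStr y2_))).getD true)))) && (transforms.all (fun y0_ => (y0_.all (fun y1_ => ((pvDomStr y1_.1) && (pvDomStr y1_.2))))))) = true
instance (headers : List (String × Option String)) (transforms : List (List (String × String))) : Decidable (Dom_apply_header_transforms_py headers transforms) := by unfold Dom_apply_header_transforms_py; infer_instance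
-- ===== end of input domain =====

-- B replaces A's per-entry case-insensitive rescan of all result keys with a
-- lowercase-key index (a queue of live keys per lowercase form) built once.
-- (The Python A mutates no argument; equivalence is about the return value.)

-- ===== PORT A =====
-- A's per-entry scan: first existing result key equal (case-insensitively) to `key`.
def pvFindMatchA (result : PySem.Dict String String) (key : String) : Option String :=
  result.keys.find? (fun existing => PySem.Str.lower existing == PySem.Str.lower key)

-- one iteration of A's `for entry in entries` loop
def pvStepA (result : PySem.Dict String String) (entry : List (String × String)) : PySem.Dict String String :=
  let e := PySem.Dict.ofList entry
  let t0 := e.getD "type" ""                 -- entry.get("type") or "replace" ("or": None/"" → default)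
  let transform_type := PySem.Str.lower (if t0 = "" then "replace" else t0)
  let key := PySem.Str.strip (e.getD "key" "")
  if key = "" then result
  else if transform_type = "remove" then
    match pvFindMatchA result key with
    | some matched => if matched ≠ "" then result.erase matched else result   -- `if matched:` truthiness
    | none => result
  else
    let value := e.getD "value" ""
    match pvFindMatchA result key with
    | some matched => result.insert (if matched = "" then key else matched) value   -- `matched or key`
    | none => result.insert key value

def apply_header_transforms_py (headers : List (String × Option String)) (transforms : List (List (String × String))) : List (String × String) :=
  let result := headers.foldl (fun d kv => d.insert kv.1 (kv.2.getD "")) PySem.Dict.empty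
  let entries := transforms   -- _normalize_rule_entries: every item of the list is a dict here
  (entries.foldl pvStepA result).items

-- ===== PORT B =====
-- one iteration of B's loop; state = (result, index: lowercase key → queue of live result keys)
def pvStepB (st : PySem.Dict String String × PySem.Dict String (List String)) (entry : List (String × String)) : PySem.Dict String String × PySem.Dict String (List String) :=
  let e := PySem.Dict.ofList entry
  let t0 := e.getD "type" ""
  let transform_type := PySem.Str.lower (if t0 = "" then "replace" else t0)
  let key := PySem.Str.strip (e.getD "key" "")
  if key = "" then st
  else
    let low := PySem.Str.lower key
    let bucket := st.2.getD low []
    if transform_type = "remove" then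
      match bucket with
      | [] => st
      | m :: rest => (st.1.erase m, st.2.insert low rest)   -- result.pop(bucket.pop(0))
    else
      let value := e.getD "value" ""
      match bucket with
      | m :: _ => (st.1.insert m value, st.2)               -- result[bucket[0]] = value
      | [] => (st.1.insert key value, st.2.insert low [key])

def apply_header_transforms_py_alt (headers : List (String × Option String)) (transforms : List (List (String × String))) : List (String × String) :=
  let result := headers.foldl (fun d kv => d.insert kv.1 (kv.2.getD "")) PySem.Dict.empty
  let index := result.keys.foldl (fun d k => d.modify (PySem.Str.lower k) [] (· ++ [k])) PySem.Dict.empty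
  ((transforms.foldl pvStepB (result, index)).1).items

-- ===== PRECONDITION & SPEC =====
def Spec_apply_header_transforms_py (headers : List (String × Option String)) (transforms : List (List (String × String))) (out : List (String × String)) : Prop := out = apply_header_transforms_py_alt headers transforms
instance (headers : List (String × Option String)) (transforms : List (List (String × String))) (out : List (String × String)) : Decidable (Spec_apply_header_transforms_py headers transforms out) := by unfold Spec_apply_header_transforms_py; infer_instance

-- ===== CLAIM (what is proved, stated in full; the proofs are below) =====
def Claim_equal_apply_header_transforms_py : Prop := ∀ (headers : List (String × Option String)) (transforms : List (List (String × String))), Dom_apply_header_transforms_py headers transforms → Spec_apply_header_transforms_py headers transforms (apply_header_transforms_py headers transforms)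

-- ===== LEMMAS AND PROOFS =====

-- the loop invariant: result keys are unique and the index holds, per lowercase
-- form, exactly the live result keys with that lowercase form, in insertion order
def pvInv (result : PySem.Dict String String) (index : PySem.Dict String (List String)) : Prop :=
  result.keys.Nodup ∧
  ∀ l : String, index.getD l [] = result.keys.filter (fun k => PySem.Str.lower k == l)

theorem pv_find_eq_head_filter {α : Type} (p : α → Bool) (l : List α) :
    l.find? p = (l.filter p).head? := by
  induction l with
  | nil => rfl
  | cons x xs ih =>
    cases hx : p x
    · rw [List.find?_cons_of_neg (by simp [hx]), List.filter_cons_of_neg (by simp [hx]), ih]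
    · rw [List.find?_cons_of_pos hx, List.filter_cons_of_pos hx]
      rfl

theorem pv_lower_eq_empty (s : String) (h : PySem.Str.lower s = "") : s = "" := by
  apply String.toList_eq_nil_iff.mp
  have h' := congrArg String.toList h
  simp [PySem.Str.lower, PySem.Chars.lower] at h'
  simpa using h'

theorem pv_keys_erase (d : PySem.Dict String String) (m : String) :
    (d.erase m).keys = d.keys.filter (fun x => !(x == m)) := by
  simp [PySem.Dict.erase, PySem.Dict.keys, List.filter_map]
  rfl

theorem pv_step_lemma (result : PySem.Dict String String) (index : PySem.Dict String (List String))
    (entry : List (String × String)) (h : pvInv result index) :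
    (pvStepB (result, index) entry).1 = pvStepA result entry ∧
    pvInv (pvStepB (result, index) entry).1 (pvStepB (result, index) entry).2 := by
  obtain ⟨hnd, hidx⟩ := h
  simp only [pvStepA, pvStepB, pvFindMatchA]
  generalize hT : PySem.Str.lower (if (PySem.Dict.ofList entry).getD "type" "" = "" then "replace" else (PySem.Dict.ofList entry).getD "type" "") = ttype
  generalize hK : PySem.Str.strip ((PySem.Dict.ofList entry).getD "key" "") = key
  generalize hV : (PySem.Dict.ofList entry).getD "value" "" = value
  by_cases hk : key = ""
  · rw [if_pos hk, if_pos hk]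
    exact ⟨rfl, hnd, hidx⟩
  · rw [if_neg hk, if_neg hk]
    have hbuck := hidx (PySem.Str.lower key)
    have hfind : result.keys.find? (fun existing => PySem.Str.lower existing == PySem.Str.lower key)
        = (index.getD (PySem.Str.lower key) []).head? := by
      rw [hbuck, pv_find_eq_head_filter]
    cases hb : index.getD (PySem.Str.lower key) [] with
    | nil =>
      have hfn : result.keys.find? (fun existing => PySem.Str.lower existing == PySem.Str.lower key) = none := by
        rw [hfind, hb]; rfl
      have hfilt : result.keys.filter (fun k => PySem.Str.lower k == PySem.Str.lower key) = [] := by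
        rw [← hbuck, hb]
      have hkeymem : key ∉ result.keys := by
        intro hmem
        have : key ∈ result.keys.filter (fun k => PySem.Str.lower k == PySem.Str.lower key) :=
          List.mem_filter.mpr ⟨hmem, by simp⟩
        rw [hfilt] at this
        exact absurd this (List.not_mem_nil)
      by_cases ht : ttype = "remove"
      · rw [if_pos ht, if_pos ht, hfn]
        exact ⟨rfl, hnd, hidx⟩
      · rw [if_neg ht, if_neg ht, hfn]
        have hcont : result.contains key = false := by
          rw [PySem.Dict.contains_eq_decide_mem_keys]; exact decide_eq_false hkeymem
        have hkeys : (result.insert key value).keys = result.keys ++ [key] :=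
          PySem.Dict.keys_insert_of_not_contains result value hcont
        refine ⟨rfl, ?_, ?_⟩
        · show (result.insert key value).keys.Nodup
          rw [hkeys]
          simp [List.nodup_append, hnd]
          exact fun a ha hE => hkeymem (hE ▸ ha)
        · show ∀ l : String, (index.insert (PySem.Str.lower key) [key]).getD l []
              = (result.insert key value).keys.filter (fun k => PySem.Str.lower k == l)
          intro l
          rw [hkeys, List.filter_append]
          by_cases hl : l = PySem.Str.lower key
          · subst hl
            rw [PySem.Dict.getD_insert_self, hfilt]
            simp
          · rw [PySem.Dict.getD_insert_of_ne _ _ _ hl, hidx l]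
            have hkl : (PySem.Str.lower key == l) = false := by
              rw [beq_eq_false_iff_ne]; exact fun hE => hl hE.symm
            simp [hkl]
    | cons m rest =>
      have hfilt : result.keys.filter (fun k => PySem.Str.lower k == PySem.Str.lower key) = m :: rest :=
        hbuck.symm.trans hb
      have hmem_f : m ∈ result.keys.filter (fun k => PySem.Str.lower k == PySem.Str.lower key) := by
        rw [hfilt]; exact List.mem_cons_self
      have hpm : (PySem.Str.lower m == PySem.Str.lower key) = true := (List.mem_filter.mp hmem_f).2
      have hpm' : PySem.Str.lower m = PySem.Str.lower key := eq_of_beq hpm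
      have hmk : m ∈ result.keys := (List.mem_filter.mp hmem_f).1
      have hmne : m ≠ "" := by
        intro h0
        apply hk
        apply pv_lower_eq_empty
        rw [← hpm', h0]; rfl
      have hndf : (m :: rest).Nodup := hfilt ▸ (hnd.filter _)
      have hfs : result.keys.find? (fun existing => PySem.Str.lower existing == PySem.Str.lower key) = some m := by
        rw [hfind, hb]; rfl
      by_cases ht : ttype = "remove"
      · rw [if_pos ht, if_pos ht, hfs]
        have hke : (result.erase m).keys = result.keys.filter (fun x => !(x == m)) :=
          pv_keys_erase result m
        refine ⟨?_, ?_, ?_⟩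
        · show result.erase m = if m ≠ "" then result.erase m else result
          rw [if_pos hmne]
        · show (result.erase m).keys.Nodup
          rw [hke]; exact hnd.filter _
        · show ∀ l : String, (index.insert (PySem.Str.lower key) rest).getD l []
              = (result.erase m).keys.filter (fun k => PySem.Str.lower k == l)
          intro l
          rw [hke]
          by_cases hl : l = PySem.Str.lower key
          · subst hl
            rw [PySem.Dict.getD_insert_self, List.filter_filter]
            have hcomm : result.keys.filter (fun a => (PySem.Str.lower a == PySem.Str.lower key) && !(a == m))
                = result.keys.filter (fun a => !(a == m) && (PySem.Str.lower a == PySem.Str.lower key)) :=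
              List.filter_congr (fun x _ => Bool.and_comm _ _)
            rw [hcomm, ← List.filter_filter, hfilt, List.filter_cons_of_neg (by simp)]
            have hrest : ∀ x ∈ rest, (!(x == m)) = true := by
              intro x hx
              simp only [Bool.not_eq_true', beq_eq_false_iff_ne]
              intro hE
              exact (List.nodup_cons.mp hndf).1 (hE ▸ hx)
            rw [List.filter_eq_self.mpr hrest]
          · rw [PySem.Dict.getD_insert_of_ne _ _ _ hl, hidx l, List.filter_filter]
            apply List.filter_congr
            intro x hx
            cases hpx : (PySem.Str.lower x == l)
            · simp
            · have hxm : (x == m) = false := by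
                rw [beq_eq_false_iff_ne]
                intro hE; subst hE
                exact hl ((eq_of_beq hpx).symm.trans hpm')
              simp [hxm]
      · rw [if_neg ht, if_neg ht, hfs]
        have hcont : result.contains m = true := (PySem.Dict.contains_iff_mem_keys result m).mpr hmk
        have hkeys : (result.insert m value).keys = result.keys :=
          PySem.Dict.keys_insert_of_contains result value hcont
        refine ⟨?_, ?_, ?_⟩
        · show result.insert m value = result.insert (if m = "" then key else m) value
          rw [if_neg hmne]
        · show (result.insert m value).keys.Nodup
          rw [hkeys]; exact hnd
        · show ∀ l : String, index.getD l []
              = (result.insert m value).keys.filter (fun k => PySem.Str.lower k == l)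
          intro l
          rw [hkeys]; exact hidx l

theorem pv_fold_lemma (ts : List (List (String × String))) :
    ∀ (result : PySem.Dict String String) (index : PySem.Dict String (List String)),
      pvInv result index →
      (ts.foldl pvStepB (result, index)).1 = ts.foldl pvStepA result := by
  induction ts with
  | nil => intro result index _; rfl
  | cons e ts ih =>
    intro result index h
    obtain ⟨h1, h2⟩ := pv_step_lemma result index e h
    simp only [List.foldl_cons]
    rcases hst : pvStepB (result, index) e with ⟨r', i'⟩
    rw [hst] at h1 h2
    have h1' : r' = pvStepA result e := h1
    have h2' : pvInv r' i' := h2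
    rw [ih r' i' h2', h1']

theorem pv_init_index (l : List String) (c : String) :
    (l.foldl (fun d k => d.modify (PySem.Str.lower k) [] (· ++ [k])) (PySem.Dict.empty : PySem.Dict String (List String))).getD c []
      = l.filter (fun k => PySem.Str.lower k == c) := by
  rw [show (List.foldl (fun d k => d.modify (PySem.Str.lower k) [] (· ++ [k])) (PySem.Dict.empty : PySem.Dict String (List String)) l)
      = List.foldl (fun d p => d.modify p.1 [] (· ++ [p.2])) (PySem.Dict.empty : PySem.Dict String (List String))
          (l.map (fun k => (PySem.Str.lower k, k))) from by rw [List.foldl_map]]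
  rw [PySem.Dict.getD_foldl_modify_append]
  simp [List.filter_map, Function.comp_def, List.map_map]

theorem pv_init_inv (headers : List (String × Option String)) :
    pvInv (headers.foldl (fun d kv => d.insert kv.1 (kv.2.getD "")) PySem.Dict.empty)
      ((headers.foldl (fun d kv => d.insert kv.1 (kv.2.getD "")) PySem.Dict.empty).keys.foldl
        (fun d k => d.modify (PySem.Str.lower k) [] (· ++ [k])) PySem.Dict.empty) := by
  constructor
  · exact PySem.Dict.nodup_keys_foldl_insert_key headers (fun kv => kv.1) _ _ PySem.Dict.nodup_keys_empty
  · intro l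
    exact pv_init_index _ l

-- ===== VERDICT (by name: the statement is the Claim_ definition above) =====
theorem apply_header_transforms_py_spec : Claim_equal_apply_header_transforms_py := by
  intro headers transforms _
  exact congrArg PySem.Dict.items (pv_fold_lemma transforms _ _ (pv_init_inv headers)).symm
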